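-- pv_equiv track=rewrite | github.com/rdd48/practice | adventofcode/2023/12.py | generate_all_perms
-- ===== SOURCE A (Python) =====
-- def generate_all_perms(c):
--     perms, new_perms = [c], []
--     while True:
--         new_perms = []
--         for c in perms:
--             for idx, i in enumerate(c):
--                 if i == '?':
--                     new_perms.append(c[:idx] + '.' + c[idx+1:])
--                     new_perms.append(c[:idx] + '#' + c[idx+1:])
--                     break
--
--         if not len(new_perms):
--             return perms
--
--         perms = new_perms
-- ===== SOURCE B (Python) =====
-- def generate_all_perms(c):
--     positions = [i for i, ch in enumerate(c) if ch == '?']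
--
--     def tuples(n):
--         if n == 0:
--             return [[]]
--         rest = tuples(n - 1)
--         return [['.'] + t for t in rest] + [['#'] + t for t in rest]
--
--     out = []
--     for t in tuples(len(positions)):
--         chars = list(c)
--         for i, x in zip(positions, t):
--             chars[i] = x
--         out.append(''.join(chars))
--     return out
-- ===== Notes on version B (the rewrite author's own statement) =====
-- stated objective: idiomatic
-- what changed: Replaces A's level-by-level BFS that rescans and rebuilds every partially-filled string per round with a one-time scan for '?' positions plus a direct cartesian-product enumeration ('.' before '#', positions left-to-right) assigned into a char list.
import Mathlib
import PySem

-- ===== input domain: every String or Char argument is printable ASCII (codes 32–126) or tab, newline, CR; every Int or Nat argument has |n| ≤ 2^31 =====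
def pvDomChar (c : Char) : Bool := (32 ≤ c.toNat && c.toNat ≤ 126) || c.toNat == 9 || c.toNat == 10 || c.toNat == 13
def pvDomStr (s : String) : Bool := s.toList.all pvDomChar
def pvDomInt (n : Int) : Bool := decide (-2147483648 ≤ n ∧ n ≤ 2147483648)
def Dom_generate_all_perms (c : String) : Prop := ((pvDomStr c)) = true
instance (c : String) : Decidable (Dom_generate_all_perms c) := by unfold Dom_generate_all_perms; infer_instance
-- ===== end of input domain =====

-- B replaces A's level-by-level BFS that rebuilds every partial string per round with a
-- one-time '?'-index scan plus direct cartesian-product enumeration; objective: idiomatic.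

-- ===== PORT A =====
-- inner "for idx, i in enumerate(c): if i == '?': ... break" — index of the first '?'
def pvFindQ : List Char → Nat → Option Nat
  | [], _ => none
  | ch :: cs, i => if ch = '?' then some i else pvFindQ cs (i + 1)

-- one string's contribution to new_perms: c[:idx] + x + c[idx+1:] for x = '.', '#'
def pvStep1 (s : List Char) : List (List Char) :=
  match pvFindQ s 0 with
  | none => []
  | some i => [s.take i ++ ['.'] ++ s.drop (i + 1), s.take i ++ ['#'] ++ s.drop (i + 1)]

-- the "for c in perms" pass appending into new_perms
def pvStepA (perms : List (List Char)) : List (List Char) :=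
  perms.foldl (fun acc s => acc ++ pvStep1 s) []

-- "while True" loop; the fuel (count of '?' + 1) only makes the same computation total
def pvLoopA : Nat → List (List Char) → List (List Char)
  | 0, perms => perms
  | n + 1, perms =>
      let np := pvStepA perms
      if np = [] then perms else pvLoopA n np

def generate_all_perms (c : String) : List String :=
  (pvLoopA (c.toList.count '?' + 1) [c.toList]).map (fun l => String.mk l)

-- ===== PORT B =====
-- positions = [i for i, ch in enumerate(c) if ch == '?']
def pvQpos : List Char → Nat → List Nat
  | [], _ => []
  | ch :: cs, i => if ch = '?' then i :: pvQpos cs (i + 1) else pvQpos cs (i + 1)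

-- tuples(n): all length-n choice lists, '.' before '#', first coordinate varying slowest
def pvTuples : Nat → List (List Char)
  | 0 => [[]]
  | n + 1 => ((pvTuples n).map (fun t => '.' :: t)) ++ ((pvTuples n).map (fun t => '#' :: t))

-- "for i, x in zip(positions, t): chars[i] = x"
def pvAssign (s : List Char) (pxs : List (Nat × Char)) : List Char :=
  pxs.foldl (fun l px => l.set px.1 px.2) s

def generate_all_perms_alt (c : String) : List String :=
  let ps := pvQpos c.toList 0
  (pvTuples ps.length).map (fun t => String.mk (pvAssign c.toList (ps.zip t)))

-- ===== PRECONDITION & SPEC =====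
def Spec_generate_all_perms (c : String) (out : List String) : Prop := out = generate_all_perms_alt c
instance (c : String) (out : List String) : Decidable (Spec_generate_all_perms c out) := by unfold Spec_generate_all_perms; infer_instance

-- ===== CLAIM (what is proved, stated in full; the proofs are below) =====
def Claim_equal_generate_all_perms : Prop := ∀ (c : String), Dom_generate_all_perms c → Spec_generate_all_perms c (generate_all_perms c)

-- ===== LEMMAS AND PROOFS =====

-- canonical depth-first expansion on the first '?', used to characterise both ports
def pvF : Nat → List Char → List (List Char)
  | 0, s => [s]
  | n + 1, s =>
      match pvFindQ s 0 with
      | none => [s]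
      | some i => pvF n (s.set i '.') ++ pvF n (s.set i '#')

theorem pvFindQ_shift (s : List Char) : ∀ j, pvFindQ s j = (pvFindQ s 0).map (· + j) := by
  induction s with
  | nil => intro j; rfl
  | cons ch cs ih =>
      intro j
      by_cases h : ch = '?'
      · simp [pvFindQ, h]
      · simp only [pvFindQ, if_neg h, ih (j + 1), ih 1, Option.map_map]
        congr 1; funext x; simp; omega

theorem pvQpos_shift (s : List Char) : ∀ j, pvQpos s j = (pvQpos s 0).map (· + j) := by
  induction s with
  | nil => intro j; rfl
  | cons ch cs ih =>
      intro j
      by_cases h : ch = '?'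
      · simp only [pvQpos, if_pos h, ih (j + 1), ih 1, List.map_map, List.map_cons]
        congr 1; · omega
        congr 1; funext x; simp; omega
      · simp only [pvQpos, if_neg h, ih (j + 1), ih 1, List.map_map]
        congr 1; funext x; simp; omega

theorem pvFindQ_head (s : List Char) : ∀ j, pvFindQ s j = (pvQpos s j).head? := by
  induction s with
  | nil => intro j; rfl
  | cons ch cs ih =>
      intro j
      by_cases h : ch = '?' <;> simp [pvFindQ, pvQpos, h, ih]

theorem pvQpos_length (s : List Char) : ∀ j, (pvQpos s j).length = s.count '?' := by
  induction s with
  | nil => intro j; rfl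
  | cons ch cs ih =>
      intro j
      by_cases h : ch = '?' <;> simp [pvQpos, h, ih]

theorem pvFindQ_lt (s : List Char) : ∀ i, pvFindQ s 0 = some i → i < s.length := by
  induction s with
  | nil => intro i h; simp [pvFindQ] at h
  | cons ch cs ih =>
      intro i h
      by_cases hc : ch = '?'
      · rw [pvFindQ, if_pos hc] at h
        simp at h; simp; omega
      · rw [pvFindQ, if_neg hc, pvFindQ_shift cs 1] at h
        rcases hq : pvFindQ cs 0 with _ | i' <;> rw [hq] at h <;> simp at h
        have := ih i' hq
        simp; omega

theorem pvQpos_set (s : List Char) (x : Char) (hx : x ≠ '?') :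
    ∀ i rest, pvQpos s 0 = i :: rest → pvQpos (s.set i x) 0 = rest := by
  induction s with
  | nil => intro i rest h; simp [pvQpos] at h
  | cons ch cs ih =>
      intro i rest h
      by_cases hc : ch = '?'
      · rw [pvQpos, if_pos hc] at h
        simp at h
        obtain ⟨hi, hr⟩ := h
        subst hi
        rw [List.set_cons_zero, pvQpos, if_neg hx, ← hr]
      · rw [pvQpos, if_neg hc, pvQpos_shift cs 1] at h
        rcases hq : pvQpos cs 0 with _ | ⟨i', rest'⟩
        · rw [hq] at h; simp at h
        · rw [hq] at h; simp at h
          obtain ⟨hi, hr⟩ := h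
          subst hi
          rw [List.set_cons_succ, pvQpos, if_neg hc, pvQpos_shift _ 1,
              ih i' rest' hq, ← hr]

theorem pvCount_set (s : List Char) (x : Char) (hx : x ≠ '?') (i : Nat) (rest : List Nat)
    (h : pvQpos s 0 = i :: rest) : (s.set i x).count '?' = rest.length := by
  rw [← pvQpos_length (s.set i x) 0, pvQpos_set s x hx i rest h]

theorem pvSlice_set (s : List Char) (x : Char) : ∀ i, i < s.length →
    s.take i ++ [x] ++ s.drop (i + 1) = s.set i x := by
  induction s with
  | nil => intro i h; simp at h
  | cons ch cs ih =>
      intro i h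
      cases i with
      | zero => simp
      | succ i' =>
          simp only [List.take_succ_cons, List.drop_succ_cons, List.set_cons_succ,
            List.cons_append, List.cons.injEq, true_and]
          exact ih i' (by simpa using h)

theorem pvStepA_flatMap (f : List Char → List (List Char)) (perms : List (List Char)) :
    ∀ acc, perms.foldl (fun acc s => acc ++ f s) acc = acc ++ perms.flatMap f := by
  induction perms with
  | nil => intro acc; simp
  | cons p ps ih => intro acc; simp [List.foldl_cons, ih, List.flatMap_cons]

theorem pvStep1_of_qpos (s : List Char) (i : Nat) (rest : List Nat)
    (h : pvQpos s 0 = i :: rest) :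
    pvStep1 s = [s.set i '.', s.set i '#'] := by
  have hf : pvFindQ s 0 = some i := by rw [pvFindQ_head s 0, h]; rfl
  have hlt : i < s.length := pvFindQ_lt s i hf
  simp only [pvStep1, hf]
  rw [pvSlice_set s '.' i hlt, pvSlice_set s '#' i hlt]

theorem pvQpos_cons_of_count (s : List Char) (k : Nat) (h : s.count '?' = k + 1) :
    ∃ i rest, pvQpos s 0 = i :: rest ∧ rest.length = k := by
  rcases hq : pvQpos s 0 with _ | ⟨i, rest⟩
  · have hl := pvQpos_length s 0; rw [hq] at hl; simp at hl; omega
  · have hl := pvQpos_length s 0; rw [hq] at hl; simp at hl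
    exact ⟨i, rest, rfl, by omega⟩

theorem pvF_succ (s : List Char) (k : Nat) (i : Nat) (rest : List Nat)
    (h : pvQpos s 0 = i :: rest) :
    pvF (k + 1) s = pvF k (s.set i '.') ++ pvF k (s.set i '#') := by
  have hf : pvFindQ s 0 = some i := by rw [pvFindQ_head s 0, h]; rfl
  rw [pvF, hf]

theorem pvLoopA_eq : ∀ k n perms, k ≤ n → (∀ s ∈ perms, List.count '?' s = k) →
    pvLoopA (n + 1) perms = perms.flatMap (pvF k) := by
  intro k
  induction k with
  | zero =>
      intro n perms _ hcount
      have hstep : pvStepA perms = [] := by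
        rw [pvStepA, pvStepA_flatMap, List.nil_append, List.flatMap_eq_nil_iff]
        intro s hs
        have hfn : pvFindQ s 0 = none := by
          rw [pvFindQ_head s 0]
          have hl := pvQpos_length s 0
          rw [hcount s hs] at hl
          rw [List.length_eq_zero_iff.mp hl]
          rfl
        rw [pvStep1, hfn]
      rw [pvLoopA]
      simp [hstep, pvF]
  | succ k ih =>
      intro n perms hn hcount
      cases n with
      | zero => omega
      | succ m =>
          rcases hp : perms with _ | ⟨p, ps⟩
          · simp [pvLoopA, pvStepA]
          · rw [← hp]
            have hstep : pvStepA perms = perms.flatMap pvStep1 := by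
              rw [pvStepA, pvStepA_flatMap, List.nil_append]
            have hne : perms.flatMap pvStep1 ≠ [] := by
              rw [hp, List.flatMap_cons]
              obtain ⟨i, rest, hq, _⟩ := pvQpos_cons_of_count p k
                (hcount p (by rw [hp]; exact List.mem_cons_self ..))
              rw [pvStep1_of_qpos p i rest hq]
              simp
            rw [pvLoopA]
            simp only [hstep, if_neg hne]
            have hcount' : ∀ s ∈ perms.flatMap pvStep1, List.count '?' s = k := by
              intro s' hs'
              rw [List.mem_flatMap] at hs'
              obtain ⟨s, hs, hmem⟩ := hs'
              obtain ⟨i, rest, hq, hlen⟩ := pvQpos_cons_of_count s k (hcount s hs)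
              rw [pvStep1_of_qpos s i rest hq] at hmem
              simp only [List.mem_cons, List.not_mem_nil, or_false] at hmem
              rcases hmem with h1 | h1
              · rw [h1, pvCount_set s '.' (by decide) i rest hq]; omega
              · rw [h1, pvCount_set s '#' (by decide) i rest hq]; omega
            rw [ih m (perms.flatMap pvStep1) (by omega) hcount']
            rw [List.flatMap_assoc]
            apply List.flatMap_congr
            intro s hs
            obtain ⟨i, rest, hq, hlen⟩ := pvQpos_cons_of_count s k (hcount s hs)
            rw [pvStep1_of_qpos s i rest hq, pvF_succ s k i rest hq]
            simp

theorem pvF_eq_tuples : ∀ k (s : List Char), s.count '?' = k →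
    pvF k s = (pvTuples k).map (fun t => pvAssign s ((pvQpos s 0).zip t)) := by
  intro k
  induction k with
  | zero =>
      intro s hc
      have hq : pvQpos s 0 = [] := by
        have hl := pvQpos_length s 0
        rw [hc] at hl
        exact List.length_eq_zero_iff.mp hl
      simp [pvF, pvTuples, hq, pvAssign]
  | succ k ih =>
      intro s hc
      obtain ⟨i, rest, hq, hlen⟩ := pvQpos_cons_of_count s k hc
      rw [pvF_succ s k i rest hq, pvTuples, hq]
      rw [ih (s.set i '.') (pvCount_set s '.' (by decide) i rest hq ▸ hlen ▸ rfl),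
          ih (s.set i '#') (pvCount_set s '#' (by decide) i rest hq ▸ hlen ▸ rfl)]
      rw [pvQpos_set s '.' (by decide) i rest hq, pvQpos_set s '#' (by decide) i rest hq]
      simp only [List.map_append, List.map_map]
      refine congrArg₂ (· ++ ·) ?_ ?_ <;>
        · apply List.map_congr_left
          intro t ht
          simp [Function.comp, pvAssign]

-- ===== VERDICT (by name: the statement is the Claim_ definition above) =====
theorem generate_all_perms_spec : Claim_equal_generate_all_perms := by
  intro c _
  unfold Spec_generate_all_perms
  simp only [generate_all_perms, generate_all_perms_alt]
  rw [pvLoopA_eq (c.toList.count '?') (c.toList.count '?') [c.toList] (le_refl _)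
        (by intro s hs; rw [List.mem_singleton] at hs; rw [hs])]
  rw [List.flatMap_cons, List.flatMap_nil, List.append_nil]
  rw [pvF_eq_tuples (c.toList.count '?') c.toList rfl]
  rw [pvQpos_length c.toList 0]
  simp [List.map_map, Function.comp]
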